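-- pv_equiv track=rewrite | github.com/haymachandhiran/hackerrank_Python_Codes | Jumping_Numbers.py | jumping_numbers
-- ===== SOURCE A (Python) =====
-- def jumping_numbers(n):
--     res = []
--     if n < 10:
--         for i in range(n+1):
--             res.append(str(i))
--     else:
--         res = [i for i in range(10)]
--         res = list(map(str, res))
--         for i in range(10, n+1):
--             i = str(i)
--             i += ''
--             temp = 0
--             for j in range(len(i)-1):
--                 if abs(int(i[j]) - int(i[j+1])) != 1:
--                     temp = 1
--             if temp == 0:
--                 res.append(str(i))
--             # if adj_dif_equals_one(i):
--             #     res.append(str(i))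
--     return res
-- ===== SOURCE B (Python) =====
-- def jumping_numbers(n):
--     def is_jump(v):
--         return v < 10 or (abs(v % 10 - v // 10 % 10) == 1 and is_jump(v // 10))
--     return [str(i) for i in range(n + 1) if is_jump(i)]
-- ===== Notes on version B (the rewrite author's own statement) =====
-- stated objective: simpler
-- what changed: A branches on n<10 and tests each number by converting it to a string and scanning adjacent character pairs with a sticky flag; B has no branch and no string-based test: a single comprehension filters range(n+1) with an arithmetic recursion on v//10 that short-circuits on the first non-adjacent digit pair.
import Mathlib
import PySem

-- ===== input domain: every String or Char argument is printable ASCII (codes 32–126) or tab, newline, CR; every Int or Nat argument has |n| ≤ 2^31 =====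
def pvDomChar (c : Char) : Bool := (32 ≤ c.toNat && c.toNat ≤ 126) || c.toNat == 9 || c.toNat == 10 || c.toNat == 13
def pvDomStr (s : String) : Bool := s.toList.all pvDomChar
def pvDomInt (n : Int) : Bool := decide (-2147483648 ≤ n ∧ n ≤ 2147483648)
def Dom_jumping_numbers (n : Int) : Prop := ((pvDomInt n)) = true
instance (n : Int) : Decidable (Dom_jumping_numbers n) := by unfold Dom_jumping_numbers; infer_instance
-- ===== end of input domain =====

-- B replaces A's n<10 branch and string-scanning adjacency test (sticky flag over character
-- pairs) by one comprehension filtering range(n+1) with an arithmetic recursion on v // 10.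


-- ===== PORT A =====
-- Python's abs() on int (used by both sources)
def pvAbs (x : Int) : Int := if x < 0 then -x else x

-- int(s[j]): s[j] then int(); both fallback branches are unreachable on A's inputs
def pvDigit (s : String) (j : Int) : Int :=
  match PySem.Str.pyGet? s j with
  | some c => (PySem.Int.ofChars? [c]).getD 0
  | none => 0

-- A's inner loop: temp = 0; for j in range(len(s)-1): if abs(int(s[j])-int(s[j+1])) != 1: temp = 1
def pvTemp (s : String) : Int :=
  (PySem.List.pyRange 0 (PySem.Str.len s - 1) 1).foldl
    (fun temp j => if pvAbs (pvDigit s j - pvDigit s (j + 1)) ≠ 1 then 1 else temp) 0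

def jumping_numbers (n : Int) : List String :=
  if n < 10 then
    (PySem.List.pyRange 0 (n + 1) 1).foldl (fun res i => res ++ [PySem.Int.toStr i]) []
  else
    let res := (PySem.List.pyRange 0 10 1).map (fun i => PySem.Int.toStr i)
    (PySem.List.pyRange 10 (n + 1) 1).foldl (fun res i =>
      let s := PySem.Int.toStr i   -- i = str(i); "i += ''" is a no-op
      if pvTemp s = 0 then res ++ [s] else res) res

-- ===== PORT B =====
def pvIsJump (v : Int) : Bool :=
  if v < 10 then true
  else (pvAbs (PySem.Int.mod v 10 - PySem.Int.mod (PySem.Int.floordiv v 10) 10) == 1)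
        && pvIsJump (PySem.Int.floordiv v 10)
termination_by v.toNat
decreasing_by
  rw [PySem.Int.floordiv_eq_ediv_of_pos (by norm_num : (0:Int) < 10)]
  omega

def jumping_numbers_alt (n : Int) : List String :=
  ((PySem.List.pyRange 0 (n + 1) 1).filter (fun i => pvIsJump i)).map (fun i => PySem.Int.toStr i)

-- ===== PRECONDITION & SPEC =====
def Spec_jumping_numbers (n : Int) (out : List String) : Prop := out = jumping_numbers_alt n
instance (n : Int) (out : List String) : Decidable (Spec_jumping_numbers n out) := by unfold Spec_jumping_numbers; infer_instance

-- ===== CLAIM (what is proved, stated in full; the proofs are below) =====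
def Claim_equal_jumping_numbers : Prop := ∀ (n : Int), Dom_jumping_numbers n → Spec_jumping_numbers n (jumping_numbers n)

-- ===== LEMMAS AND PROOFS =====

-- int value of a single-digit string (proof-side view of pvDigit)
def pvCv (c : Char) : Int := (PySem.Int.ofChars? [c]).getD 0

-- adjacent digit characters differ by one
def pvAdj (a b : Char) : Bool := pvAbs (pvCv a - pvCv b) == 1

-- structural form of A's whole-string adjacency check
def pvChain : List Char → Bool
  | a :: b :: t => pvAdj a b && pvChain (b :: t)
  | _ => true

theorem pvAbs_eq_natAbs (x : Int) : pvAbs x = (x.natAbs : Int) := by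
  unfold pvAbs; split <;> omega

theorem pvCv_digitChar : ∀ d : Nat, d < 10 → pvCv (Nat.digitChar d) = (d : Int) := by decide

theorem pvTdcAcc (b : Nat) : ∀ (f n : Nat) (l : List Char),
    Nat.toDigitsCore b f n l = Nat.toDigitsCore b f n [] ++ l := by
  intro f
  induction f with
  | zero => intro n l; simp [Nat.toDigitsCore]
  | succ f ih =>
    intro n l
    simp only [Nat.toDigitsCore]
    by_cases h : n / b = 0
    · simp [h]
    · simp only [h, if_false]
      rw [ih (n / b) ((n % b).digitChar :: l), ih (n / b) [(n % b).digitChar]]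
      simp

theorem pvTdcFuel : ∀ (n f f' : Nat), n < f → n < f' →
    Nat.toDigitsCore 10 f n [] = Nat.toDigitsCore 10 f' n [] := by
  intro n
  induction n using Nat.strong_induction_on with
  | _ n ih =>
    intro f f' hf hf'
    obtain ⟨g, rfl⟩ : ∃ g, f = g + 1 := ⟨f - 1, by omega⟩
    obtain ⟨g', rfl⟩ : ∃ g', f' = g' + 1 := ⟨f' - 1, by omega⟩
    simp only [Nat.toDigitsCore]
    by_cases h : n / 10 = 0
    · simp [h]
    · simp only [h, if_false]
      rw [pvTdcAcc 10 g (n / 10), pvTdcAcc 10 g' (n / 10)]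
      rw [ih (n / 10) (by omega) g g' (by omega) (by omega)]

theorem pvToDigits_lt {m : Nat} (h : m < 10) : Nat.toDigits 10 m = [Nat.digitChar m] := by
  simp [Nat.toDigits, Nat.toDigitsCore, Nat.div_eq_of_lt h, Nat.mod_eq_of_lt h]

theorem pvToDigits_rec {m : Nat} (h : 10 ≤ m) :
    Nat.toDigits 10 m = Nat.toDigits 10 (m / 10) ++ [Nat.digitChar (m % 10)] := by
  have hne : m / 10 ≠ 0 := by omega
  have h1 : Nat.toDigits 10 m = Nat.toDigitsCore 10 m (m / 10) [(m % 10).digitChar] := by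
    simp [Nat.toDigits, Nat.toDigitsCore, hne]
  rw [h1, pvTdcAcc 10 m (m / 10)]
  rw [pvTdcFuel (m / 10) m (m / 10 + 1) (by omega) (by omega)]
  simp [Nat.toDigits]

theorem pvToDigits_getLast? (m : Nat) :
    (Nat.toDigits 10 m).getLast? = some (Nat.digitChar (m % 10)) := by
  by_cases h : m < 10
  · rw [pvToDigits_lt h, Nat.mod_eq_of_lt h]; rfl
  · rw [pvToDigits_rec (by omega), List.getLast?_concat]

theorem pvChain_concat (l : List Char) (c : Char) :
    pvChain (l ++ [c]) = (pvChain l &&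
      match l.getLast? with | none => true | some a => pvAdj a c) := by
  induction l with
  | nil => simp [pvChain]
  | cons a t ih =>
    cases t with
    | nil => simp [pvChain]
    | cons b t' =>
      have : (a :: b :: t') ++ [c] = a :: ((b :: t') ++ [c]) := rfl
      rw [this]
      show (pvAdj a b && pvChain ((b :: t') ++ [c])) = _
      rw [ih]
      rw [List.getLast?_cons_cons]
      show _ = (pvAdj a b && pvChain (b :: t') && _)
      rw [Bool.and_assoc]

theorem pvChain_iff_idx (cs : List Char) :
    pvChain cs = true ↔ ∀ k : Nat, (h : k + 1 < cs.length) → pvAdj cs[k] cs[k+1] = true := by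
  induction cs with
  | nil => simp [pvChain]
  | cons a t ih =>
    cases t with
    | nil => simp [pvChain]
    | cons b t' =>
      show (pvAdj a b && pvChain (b :: t')) = true ↔ _
      rw [Bool.and_eq_true, ih]
      constructor
      · rintro ⟨h1, h2⟩ k hk
        cases k with
        | zero => simpa using h1
        | succ k => simpa using h2 k (by simpa using hk)
      · intro h
        refine ⟨by simpa using h 0 (by simp), fun k hk => ?_⟩
        simpa using h (k + 1) (by simpa using hk)

theorem pvIsJump_lt {v : Int} (h : v < 10) : pvIsJump v = true := by
  unfold pvIsJump; simp [h]

theorem pvIsJump_ge {v : Int} (h : ¬ v < 10) :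
    pvIsJump v = ((pvAbs (PySem.Int.mod v 10 - PySem.Int.mod (PySem.Int.floordiv v 10) 10) == 1)
        && pvIsJump (PySem.Int.floordiv v 10)) := by
  rw [pvIsJump]; simp [h]

theorem pvMod_cast (m : Nat) : PySem.Int.mod (m : Int) 10 = ((m % 10 : Nat) : Int) := by
  rw [PySem.Int.mod_eq_emod_of_pos (by norm_num)]; omega

theorem pvDiv_cast (m : Nat) : PySem.Int.floordiv (m : Int) 10 = ((m / 10 : Nat) : Int) := by
  rw [PySem.Int.floordiv_eq_ediv_of_pos (by norm_num)]; omega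

theorem pvMainChain (m : Nat) : pvChain (Nat.toDigits 10 m) = pvIsJump (m : Int) := by
  induction m using Nat.strong_induction_on with
  | _ m ih =>
    by_cases h : m < 10
    · rw [pvToDigits_lt h, pvIsJump_lt (by exact_mod_cast h)]
      rfl
    · rw [pvToDigits_rec (by omega), pvChain_concat, pvToDigits_getLast? (m / 10)]
      rw [pvIsJump_ge (by exact_mod_cast h)]
      rw [pvMod_cast m, pvDiv_cast m, pvMod_cast (m / 10)]
      rw [ih (m / 10) (by omega)]
      show (pvIsJump ((m / 10 : Nat) : Int) && pvAdj (Nat.digitChar (m / 10 % 10)) (Nat.digitChar (m % 10))) = _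
      rw [Bool.and_comm]
      congr 1
      unfold pvAdj
      rw [pvCv_digitChar (m / 10 % 10) (by omega), pvCv_digitChar (m % 10) (by omega)]
      rw [pvAbs_eq_natAbs, pvAbs_eq_natAbs]
      congr 1
      omega

theorem pvFlagFoldl (cond : Int → Prop) [DecidablePred cond] :
    ∀ (l : List Int) (t : Int),
      (l.foldl (fun t j => if cond j then 1 else t) t = 0) ↔ (t = 0 ∧ ∀ j ∈ l, ¬ cond j) := by
  intro l
  induction l with
  | nil => simp
  | cons a l ih =>
    intro t
    simp only [List.foldl_cons, List.mem_cons]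
    by_cases h : cond a
    · simp only [h, if_true]
      rw [ih 1]
      constructor
      · rintro ⟨h1, -⟩
        exact absurd h1 (by norm_num)
      · rintro ⟨-, h2⟩
        exact absurd h (h2 a (Or.inl rfl))
    · simp only [h, if_false]
      rw [ih t]
      constructor
      · rintro ⟨h1, h2⟩
        refine ⟨h1, fun j hj => ?_⟩
        rcases hj with rfl | hj
        · exact h
        · exact h2 j hj
      · rintro ⟨h1, h2⟩
        exact ⟨h1, fun j hj => h2 j (Or.inr hj)⟩

theorem pvDigit_eq_cv (s : String) (k : Nat) (hk : k < s.toList.length) :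
    pvDigit s (k : Int) = pvCv s.toList[k] := by
  unfold pvDigit
  rw [PySem.Str.pyGet?_natCast, List.getElem?_eq_getElem hk]
  rfl


theorem pvTemp_iff (s : String) : pvTemp s = 0 ↔ pvChain s.toList = true := by
  unfold pvTemp
  rw [pvFlagFoldl (fun j => pvAbs (pvDigit s j - pvDigit s (j + 1)) ≠ 1)]
  rw [pvChain_iff_idx]
  simp only [PySem.Str.len_eq, true_and, PySem.List.mem_pyRange_one, not_not]
  constructor
  · intro h k hk
    have h0 : pvAbs (pvDigit s (k : Int) - pvDigit s ((k : Int) + 1)) = 1 := by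
      refine h (k : Int) ⟨by omega, by omega⟩
    rw [pvDigit_eq_cv s k (by omega)] at h0
    have hc : ((k : Int) + 1) = ((k + 1 : Nat) : Int) := by push_cast; ring
    rw [hc, pvDigit_eq_cv s (k + 1) hk] at h0
    unfold pvAdj
    simpa using h0
  · rintro h j ⟨hj0, hj1⟩
    obtain ⟨k, rfl⟩ : ∃ k : Nat, j = (k : Int) := ⟨j.toNat, by omega⟩
    have hk : k + 1 < s.toList.length := by omega
    have := h k hk
    unfold pvAdj at this
    rw [pvDigit_eq_cv s k (by omega)]
    have hc : ((k : Int) + 1) = ((k + 1 : Nat) : Int) := by push_cast; ring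
    rw [hc, pvDigit_eq_cv s (k + 1) hk]
    simpa using this

theorem pvCheck_eq_isJump (i : Int) (h : 10 ≤ i) :
    decide (pvTemp (PySem.Int.toStr i) = 0) = pvIsJump i := by
  have hchain : (PySem.Int.toStr i).toList = Nat.toDigits 10 i.toNat := by
    rw [PySem.Int.toList_toStr]
    unfold PySem.Int.toChars
    rw [if_neg (by omega)]
  have hi : ((i.toNat : Nat) : Int) = i := by omega
  have key : pvTemp (PySem.Int.toStr i) = 0 ↔ pvIsJump i = true := by
    rw [pvTemp_iff, hchain, pvMainChain, hi]
  rcases Bool.eq_false_or_eq_true (pvIsJump i) with hb | hb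
  · rw [hb]
    exact decide_eq_true (key.mpr hb)
  · rw [hb, decide_eq_false_iff_not, key, hb]
    simp

-- ===== VERDICT (by name: the statement is the Claim_ definition above) =====
theorem jumping_numbers_spec : Claim_equal_jumping_numbers := by
  intro n _
  unfold Spec_jumping_numbers jumping_numbers jumping_numbers_alt
  by_cases hn : n < 10
  · rw [if_pos hn]
    rw [PySem.List.foldl_append_singleton_eq_map (fun i => PySem.Int.toStr i)]
    rw [List.filter_eq_self.mpr]
    · simp
    · intro i hi
      rw [PySem.List.mem_pyRange_one] at hi
      exact pvIsJump_lt (by omega)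
  · rw [if_neg hn]
    simp only []
    -- A's loop body as a filter-shaped fold
    have hbody : ((PySem.List.pyRange 10 (n + 1) 1).foldl (fun res i =>
        let s := PySem.Int.toStr i
        if pvTemp s = 0 then res ++ [s] else res)
        ((PySem.List.pyRange 0 10 1).map (fun i => PySem.Int.toStr i)))
        = ((PySem.List.pyRange 10 (n + 1) 1).foldl (fun res i =>
            if (fun i => decide (pvTemp (PySem.Int.toStr i) = 0)) i = true
            then res ++ [PySem.Int.toStr i] else res)
            ((PySem.List.pyRange 0 10 1).map (fun i => PySem.Int.toStr i))) := by
      refine PySem.List.foldl_congr_mem _ _ _ _ ?_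
      intro acc x _
      by_cases h : pvTemp (PySem.Int.toStr x) = 0 <;> simp [h]
    rw [hbody, PySem.List.foldl_append_if]
    have hfilter : List.filter (fun x => decide (pvTemp (PySem.Int.toStr x) = 0))
        (PySem.List.pyRange 10 (n + 1) 1)
        = List.filter (fun i => pvIsJump i) (PySem.List.pyRange 10 (n + 1) 1) := by
      refine List.filter_congr ?_
      intro x hx
      rw [PySem.List.mem_pyRange_one] at hx
      exact pvCheck_eq_isJump x hx.1
    rw [hfilter]
    rw [PySem.List.pyRange_one_append 0 10 (n + 1) (by norm_num) (by omega)]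
    rw [List.filter_append, List.map_append]
    have h10 : List.filter (fun i => pvIsJump i) (PySem.List.pyRange 0 10 1)
        = PySem.List.pyRange 0 10 1 := by
      refine List.filter_eq_self.mpr ?_
      intro i hi
      rw [PySem.List.mem_pyRange_one] at hi
      exact pvIsJump_lt (by omega)
    rw [h10]
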